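-- pv_equiv track=rewrite | github.com/Chae-hyeong/Algorithm_Study | 백준/Bronze/2581. 소수/소수.py | get_prime_info
-- ===== SOURCE A (Python) =====
-- import math
--
-- def get_prime_info(M, N):
--     numbers = [True for _ in range(N + 1)]
--     numbers[0] = numbers[1] = False
--
--     for i in range(2, int(math.sqrt(N)) + 1):
--         if numbers[i]:
--             for p in range(i * i, N + 1, i):
--                 numbers[p] = False
--
--     primes = [p for p in range(M, N + 1) if numbers[p]]
--
--     if primes:
--         return sum(primes), min(primes)
--     else:
--         return None
-- ===== SOURCE B (Python) =====
-- def get_prime_info(M, N):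
--     def is_prime(p):
--         if p < 2:
--             return False
--         d = 2
--         while d * d <= p:
--             if p % d == 0:
--                 return False
--             d += 1
--         return True
--
--     total = 0
--     smallest = None
--     for p in range(M, N + 1):
--         if is_prime(p):
--             total += p
--             if smallest is None:
--                 smallest = p
--     return None if smallest is None else (total, smallest)
-- ===== Notes on version B (the rewrite author's own statement) =====
-- stated objective: simpler
-- what changed: Replaced the Sieve of Eratosthenes over a shared boolean array by a single accumulator pass that trial-divides each candidate up to its square root, keeping a running sum and first prime instead of building the primes list.
-- intended difference: For M < 0 (with some prime in [M+N+1, N]) A's list comprehension reads the sieve with Python's negative-index wraparound and so counts negative numbers such as -4 as primes (e.g. A(-4,10) = (13, -4)); B returns the sum and minimum of the actual primes in [M, N] ((17, 2)), which is the intended value. — e.g. on get_prime_info(-4, 10): A returns some (13, -4), B returns some (17, 2)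
import Mathlib
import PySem

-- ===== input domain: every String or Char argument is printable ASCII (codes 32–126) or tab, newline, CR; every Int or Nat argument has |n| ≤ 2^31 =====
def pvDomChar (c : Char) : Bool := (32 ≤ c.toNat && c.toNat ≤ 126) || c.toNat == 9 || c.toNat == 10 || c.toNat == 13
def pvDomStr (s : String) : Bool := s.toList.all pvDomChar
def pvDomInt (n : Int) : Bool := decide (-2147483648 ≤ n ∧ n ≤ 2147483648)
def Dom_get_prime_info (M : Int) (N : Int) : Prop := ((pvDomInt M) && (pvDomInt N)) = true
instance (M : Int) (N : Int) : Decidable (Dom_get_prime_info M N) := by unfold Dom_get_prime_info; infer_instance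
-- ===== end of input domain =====

-- B replaces A's sieve array + primes list by one accumulator pass with trial division (simpler, no shared array);
-- on M < 0 A's negative-index wraparound counts negatives as primes — B returns the primes of [M, N] there (see D_ below).

-- hand-ported integer square root (PySem has no isqrt): largest r ≤ n with r*r ≤ n, found by counting down;
-- exact for int(math.sqrt(x)) and math.isqrt(x) on 0 ≤ x ≤ 2^31 (double sqrt is correctly rounded there)
def pvSqrtGo (n : Nat) : Nat → Nat
  | 0 => 0
  | r + 1 => if (r + 1) * (r + 1) ≤ n then r + 1 else pvSqrtGo n r
def pvSqrt (x : Int) : Int := (pvSqrtGo x.toNat x.toNat : Int)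

-- ===== PORT A =====
-- The Python list 'numbers' with index assignment is an Array Bool here. All sieve indices (0, 1, i ≥ 2, p ≥ i*i)
-- are nonnegative and, under Pre_, in range, so .toNat indexing and the in-bounds set are exact there.
def pvSieveStep (N : Int) (nums : Array Bool) (i : Int) : Array Bool :=
  if nums.getD i.toNat false = true then
    (PySem.List.pyRange (i * i) (N + 1) i).foldl (fun ns p => ns.setIfInBounds p.toNat false) nums
  else nums

def pvSieve (N : Int) : Array Bool :=
  let numbers0 : Array Bool := ((PySem.List.pyRange 0 (N + 1) 1).map (fun _ => true)).toArray
  let numbers1 : Array Bool := (numbers0.setIfInBounds 0 false).setIfInBounds 1 false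
  (PySem.List.pyRange 2 (pvSqrt N + 1) 1).foldl (pvSieveStep N) numbers1

-- Python's numbers[p] in the comprehension: a possibly NEGATIVE index wraps from the end;
-- exact for -len ≤ p < len, which Pre_ guarantees.
def pvRead (numbers : Array Bool) (p : Int) : Bool :=
  numbers.getD (if p < 0 then (p + numbers.size).toNat else p.toNat) false

def get_prime_info (M : Int) (N : Int) : Option (Int × Int) :=
  let numbers : Array Bool := pvSieve N
  let primes : List Int :=
    (PySem.List.pyRange M (N + 1) 1).filter (fun p => pvRead numbers p)
  if primes.isEmpty then none
  else some (primes.sum, (PySem.List.min? primes (fun x => x)).getD 0)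

-- ===== PORT B =====
-- the 'while d * d <= p' trial-division loop of is_prime; the fuel (p-1 steps suffice for d = 2, 3, …)
-- only makes the same loop structurally total — it never runs out before the loop condition fails
def pvTrialGo (p : Int) : Nat → Int → Bool
  | 0, _ => true
  | fuel + 1, d =>
    if d * d ≤ p then
      (if PySem.Int.mod p d = 0 then false else pvTrialGo p fuel (d + 1))
    else true

def pvIsPrime (p : Int) : Bool := if p < 2 then false else pvTrialGo p (p - 1).toNat 2

-- loop body: running sum and first prime seen
def pvStep (st : Int × Option Int) (p : Int) : Int × Option Int :=
  if pvIsPrime p then (st.1 + p, if st.2 = none then some p else st.2) else st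

def get_prime_info_alt (M : Int) (N : Int) : Option (Int × Int) :=
  let st : Int × Option Int := (PySem.List.pyRange M (N + 1) 1).foldl pvStep (0, none)
  match st.2 with
  | none => none
  | some s => some (st.1, s)

-- ===== PRECONDITION & SPEC =====
-- A raises IndexError when N ≤ 0 (the numbers[1] assignment) or M < -(N+1) (index below -len in the comprehension).
def Pre_get_prime_info (M : Int) (N : Int) : Prop := 1 ≤ N ∧ -(N + 1) ≤ M
instance (M : Int) (N : Int) : Decidable (Pre_get_prime_info M N) := by unfold Pre_get_prime_info; infer_instance
def pvWitness_get_prime_info : Int × Int := (2, 10)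

-- For M < 0 with a prime in [M+N+1, N], A's comprehension reads the sieve with negative-index wraparound and counts
-- negative numbers as primes (A(-4,10) = (13,-4)); B returns the sum/min of the actual primes in [M,N] ((17,2)), the intended value.
def D_get_prime_info (M : Int) (N : Int) : Prop :=
  1 ≤ N ∧ M < 0 ∧ ∃ q ∈ Finset.Icc ((max 2 (M + N + 1)).toNat) N.toNat, Nat.Prime q
instance (M : Int) (N : Int) : Decidable (D_get_prime_info M N) := by unfold D_get_prime_info; infer_instance

def Spec_get_prime_info (M : Int) (N : Int) (out : Option (Int × Int)) : Prop :=
  ¬ D_get_prime_info M N → out = get_prime_info_alt M N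
instance (M : Int) (N : Int) (out : Option (Int × Int)) : Decidable (Spec_get_prime_info M N out) := by unfold Spec_get_prime_info; infer_instance

def pvDiffWitness_get_prime_info : Int × Int := (-4, 10)
def pvDiffWitnessOut_get_prime_info : (Option (Int × Int)) × (Option (Int × Int)) :=
  (some (13, -4), some (17, 2))

-- ===== CLAIM (what is proved, stated in full; the proofs are below) =====
def Claim_unchanged_get_prime_info : Prop := ∀ (M : Int) (N : Int), Dom_get_prime_info M N → Pre_get_prime_info M N → Spec_get_prime_info M N (get_prime_info M N)
def Claim_changed_get_prime_info : Prop := Dom_get_prime_info (pvDiffWitness_get_prime_info.1) (pvDiffWitness_get_prime_info.2) ∧ Pre_get_prime_info (pvDiffWitness_get_prime_info.1) (pvDiffWitness_get_prime_info.2) ∧ D_get_prime_info (pvDiffWitness_get_prime_info.1) (pvDiffWitness_get_prime_info.2) ∧ get_prime_info (pvDiffWitness_get_prime_info.1) (pvDiffWitness_get_prime_info.2) = pvDiffWitnessOut_get_prime_info.1 ∧ get_prime_info_alt (pvDiffWitness_get_prime_info.1) (pvDiffWitness_get_prime_info.2) = pvDiffWitnessOut_get_prime_info.2 ∧ pvDiffWitnessOut_get_prime_info.1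 ≠ pvDiffWitnessOut_get_prime_info.2
def Claim_exact_get_prime_info : Prop := ∀ (M : Int) (N : Int), Dom_get_prime_info M N → Pre_get_prime_info M N → D_get_prime_info M N → get_prime_info M N ≠ get_prime_info_alt M N

-- ===== LEMMAS AND PROOFS =====

-- sieve cell j after processing outer indices 2..k: "no divisor d with 2 ≤ d ≤ k, d*d ≤ j"
def pvGood (k j : Int) : Prop := 2 ≤ j ∧ ∀ d : Int, 2 ≤ d → d ≤ k → d * d ≤ j → ¬ d ∣ j
-- trial-division primality on Int
def pvPrimeI (j : Int) : Prop := 2 ≤ j ∧ ∀ d : Int, 2 ≤ d → d * d ≤ j → ¬ d ∣ j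

-- Bool versions (the sieve stores Bools; no extra Decidable instances needed)
def pvGoodB (k j : Int) : Bool :=
  decide (2 ≤ j) && ((PySem.List.pyRange 2 (k + 1) 1).all fun d => !(decide (d * d ≤ j) && decide (d ∣ j)))

theorem pvGoodB_iff (k j : Int) : pvGoodB k j = true ↔ pvGood k j := by
  unfold pvGoodB pvGood
  rw [Bool.and_eq_true, decide_eq_true_iff, List.all_eq_true]
  constructor
  · rintro ⟨h2, hall⟩
    refine ⟨h2, fun d hd1 hd2 hdd hdvd => ?_⟩
    have := hall d (PySem.List.mem_pyRange_one.mpr ⟨hd1, by omega⟩)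
    simp only [Bool.not_and, Bool.or_eq_true, Bool.not_eq_true', decide_eq_false_iff_not] at this
    rcases this with h | h
    · exact h hdd
    · exact h hdvd
  · rintro ⟨h2, hall⟩
    refine ⟨h2, fun d hdm => ?_⟩
    rw [PySem.List.mem_pyRange_one] at hdm
    simp only [Bool.not_and, Bool.or_eq_true, Bool.not_eq_true', decide_eq_false_iff_not]
    by_cases hdd : d * d ≤ j
    · exact Or.inr (hall d hdm.1 (by omega) hdd)
    · exact Or.inl hdd

theorem pvGoodB_eq_true {k j : Int} (h : pvGood k j) : pvGoodB k j = true := (pvGoodB_iff k j).mpr h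

theorem pvGoodB_eq_false {k j : Int} (h : ¬ pvGood k j) : pvGoodB k j = false := by
  rcases hb : pvGoodB k j with _ | _
  · rfl
  · exact absurd ((pvGoodB_iff k j).mp hb) h

theorem pvGoodB_congr {k k' j j' : Int} (h : pvGood k j ↔ pvGood k' j') :
    pvGoodB k j = pvGoodB k' j' := by
  by_cases hg : pvGood k j
  · rw [pvGoodB_eq_true hg, pvGoodB_eq_true (h.mp hg)]
  · rw [pvGoodB_eq_false hg, pvGoodB_eq_false (h.not.mp hg)]

def pvPrimeB (j : Int) : Bool := pvGoodB j j

theorem pvPrimeB_iff (j : Int) : pvPrimeB j = true ↔ pvPrimeI j := by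
  unfold pvPrimeB
  rw [pvGoodB_iff]
  unfold pvGood pvPrimeI
  constructor
  · refine fun ⟨h1, h2⟩ => ⟨h1, fun d hd hdd hdvd => h2 d hd ?_ hdd hdvd⟩
    nlinarith
  · exact fun ⟨h1, h2⟩ => ⟨h1, fun d hd _ hdd => h2 d hd hdd⟩

theorem pvPrimeB_eq_true {j : Int} (h : pvPrimeI j) : pvPrimeB j = true := (pvPrimeB_iff j).mpr h

theorem pvPrimeB_eq_false {j : Int} (h : ¬ pvPrimeI j) : pvPrimeB j = false := by
  rcases hb : pvPrimeB j with _ | _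
  · rfl
  · exact absurd ((pvPrimeB_iff j).mp hb) h
theorem pvSqrtGo_eq (n : Nat) : ∀ r, Nat.sqrt n ≤ r → pvSqrtGo n r = Nat.sqrt n := by
  intro r
  induction r with
  | zero => intro h; simp [pvSqrtGo]; omega
  | succ r ih =>
    intro h
    unfold pvSqrtGo
    split
    · next hle => have := Nat.le_sqrt'.mpr (by nlinarith : (r + 1) ^ 2 ≤ n); omega
    · next hgt =>
      have := Nat.sqrt_lt'.mpr (by nlinarith : n < (r + 1) ^ 2)
      exact ih (by omega)

theorem pvSqrt_eq (x : Int) : pvSqrt x = (Nat.sqrt x.toNat : Int) := by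
  unfold pvSqrt
  rw [pvSqrtGo_eq _ _ (Nat.sqrt_le_self _)]

theorem le_pvSqrt_iff (x d : Int) (hx : 0 ≤ x) (hd : 0 ≤ d) : d ≤ pvSqrt x ↔ d * d ≤ x := by
  rw [pvSqrt_eq]
  have e1 : ((d.toNat : Int)) = d := Int.toNat_of_nonneg hd
  have e2 : ((x.toNat : Int)) = x := Int.toNat_of_nonneg hx
  constructor
  · intro h
    have h' : d.toNat ≤ Nat.sqrt x.toNat := by omega
    have h2 : d.toNat * d.toNat ≤ x.toNat :=
      le_trans (Nat.mul_le_mul h' h') (by nlinarith [Nat.sqrt_le' x.toNat])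
    zify at h2
    rw [e1, e2] at h2
    exact h2
  · intro h
    have h2 : d.toNat * d.toNat ≤ x.toNat := by
      zify
      rw [e1, e2]
      exact h
    have := Nat.le_sqrt'.mpr (by nlinarith : d.toNat ^ 2 ≤ x.toNat)
    omega

theorem pvTrialGo_iff (p : Int) : ∀ (fuel : Nat) (d : Int), 1 ≤ d → (p + 1 - d).toNat ≤ fuel →
    (pvTrialGo p fuel d = true ↔ ∀ e : Int, d ≤ e → e * e ≤ p → ¬ e ∣ p) := by
  intro fuel
  induction fuel with
  | zero =>
    intro d hd hfuel
    have hda : p + 1 - d ≤ 0 := by omega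
    unfold pvTrialGo
    refine ⟨fun _ e he hee hdvd => by nlinarith, fun _ => rfl⟩
  | succ fuel ih =>
    intro d hd hfuel
    unfold pvTrialGo
    by_cases hdp : d * d ≤ p
    · rw [if_pos hdp]
      by_cases hmod : PySem.Int.mod p d = 0
      · rw [if_pos hmod]
        simp only [Bool.false_eq_true, false_iff]
        intro hall
        exact hall d le_rfl hdp ((PySem.Int.mod_eq_zero_iff_dvd p d).mp hmod)
      · rw [if_neg hmod]
        have hdle : d ≤ p := by nlinarith
        rw [ih (d + 1) (by omega) (by omega)]
        constructor
        · intro hall e he hee hdvd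
          rcases (by omega : e = d ∨ d + 1 ≤ e) with rfl | he'
          · exact hmod ((PySem.Int.mod_eq_zero_iff_dvd p e).mpr hdvd)
          · exact hall e he' hee hdvd
        · exact fun hall e he hee => hall e (by omega) hee
    · rw [if_neg hdp]
      refine ⟨fun _ e he hee hdvd => by nlinarith, fun _ => rfl⟩

theorem pvIsPrime_iff (p : Int) : pvIsPrime p = true ↔ pvPrimeI p := by
  unfold pvIsPrime pvPrimeI
  by_cases h2 : p < 2
  · simp only [if_pos h2, Bool.false_eq_true, false_iff, not_and]
    omega
  · rw [if_neg h2, pvTrialGo_iff p (p - 1).toNat 2 (by omega) (by omega)]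
    constructor
    · exact fun hall => ⟨by omega, fun e he => hall e he⟩
    · exact fun ⟨_, hall⟩ e he => hall e he

theorem pvIsPrime_eq (p : Int) : pvIsPrime p = pvPrimeB p := by
  by_cases h : pvPrimeI p
  · rw [pvPrimeB_eq_true h, (pvIsPrime_iff p).mpr h]
  · rw [pvPrimeB_eq_false h]
    rcases hb : pvIsPrime p with _ | _
    · rfl
    · exact absurd ((pvIsPrime_iff p).mp hb) h

theorem pvPrimeI_iff (q : Int) : pvPrimeI q ↔ 2 ≤ q ∧ Nat.Prime q.toNat := by
  unfold pvPrimeI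
  constructor
  · rintro ⟨h2, hnd⟩
    refine ⟨h2, ?_⟩
    by_contra hnp
    obtain ⟨m, hmdvd, hm2, hmlt⟩ := Nat.exists_dvd_of_not_prime2 (by omega) hnp
    obtain ⟨c, hc⟩ := hmdvd
    have hq : ((q.toNat : Int)) = q := Int.toNat_of_nonneg (by omega)
    have hc2 : 2 ≤ c := by nlinarith
    have hdq : (m : Int) ∣ q := by
      refine ⟨(c : Int), ?_⟩
      rw [← hq]
      exact_mod_cast hc
    have hcq : (c : Int) ∣ q := by
      refine ⟨(m : Int), ?_⟩
      rw [← hq, mul_comm]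
      exact_mod_cast hc
    by_cases hmm : m * m ≤ q.toNat
    · refine hnd (m : Int) (by exact_mod_cast hm2) ?_ hdq
      have : ((m * m : Nat) : Int) ≤ ((q.toNat : Nat) : Int) := by exact_mod_cast hmm
      push_cast at this
      omega
    · have hcm : c < m := by nlinarith
      have hcc : c * c ≤ q.toNat := by nlinarith
      refine hnd (c : Int) (by exact_mod_cast hc2) ?_ hcq
      have : ((c * c : Nat) : Int) ≤ ((q.toNat : Nat) : Int) := by exact_mod_cast hcc
      push_cast at this
      omega
  · rintro ⟨h2, hp⟩
    refine ⟨h2, fun d hd hdd hdvd => ?_⟩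
    have hq : ((q.toNat : Int)) = q := Int.toNat_of_nonneg (by omega)
    have hd' : ((d.toNat : Int)) = d := Int.toNat_of_nonneg (by omega)
    have hdvd' : d.toNat ∣ q.toNat := by
      rw [← Int.natCast_dvd_natCast, hq, hd']
      exact hdvd
    rcases (Nat.Prime.eq_one_or_self_of_dvd hp _ hdvd') with h1 | hs
    · omega
    · have : d = q := by omega
      nlinarith

-- the inner marking loop: sets every listed (nonnegative) index to false, leaves everything else alone
theorem pvMarkFold (L : List Int) (hL : ∀ p ∈ L, 0 ≤ p) (ns : List Bool) :
    (L.foldl (fun ns p => PySem.List.pySetD ns p false) ns).length = ns.length ∧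
    ∀ j : Nat, (L.foldl (fun ns p => PySem.List.pySetD ns p false) ns)[j]? =
      if (j : Int) ∈ L then (if j < ns.length then some false else none) else ns[j]? := by
  induction L generalizing ns with
  | nil => simp
  | cons p L ih =>
    have hp0 : 0 ≤ p := hL p (by simp)
    have hset : PySem.List.pySetD ns p false = ns.set p.toNat false :=
      PySem.List.pySetD_of_nonneg ns false hp0
    have hlen : (ns.set p.toNat false).length = ns.length := List.length_set
    obtain ⟨ihl, ihg⟩ := ih (fun x hx => hL x (by simp [hx])) (ns.set p.toNat false)
    rw [List.foldl_cons, hset]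
    refine ⟨by rw [ihl, hlen], fun j => ?_⟩
    rw [ihg j, hlen]
    by_cases hjL : (j : Int) ∈ L
    · simp [hjL]
    · by_cases hjp : (j : Int) = p
      · have hj : j = p.toNat := by omega
        subst hj
        simp only [List.mem_cons, hjp, true_or, if_pos]
        by_cases hlt : p.toNat < ns.length
        · rw [if_pos hlt, List.getElem?_set_self hlt]
          split <;> rfl
        · rw [if_neg hlt, List.getElem?_eq_none (by omega)]
          split <;> rfl
      · have hj : j ≠ p.toNat := by omega
        have : ¬ ((j : Int) ∈ p :: L) := by simp [hjp, hjL]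
        rw [if_neg hjL, if_neg this, List.getElem?_set_ne (by omega)]

-- list shadow of the sieve: the same computation on (pvSieve N).toList, where the List lemmas live
def pvInit (N : Int) : List Bool :=
  (((PySem.List.pyRange 0 (N + 1) 1).map (fun _ => true)).set 0 false).set 1 false

def pvSieveStepL (N : Int) (nums : List Bool) (i : Int) : List Bool :=
  if PySem.List.pyGetD nums i false = true then
    (PySem.List.pyRange (i * i) (N + 1) i).foldl (fun ns p => PySem.List.pySetD ns p false) nums
  else nums

def pvSieveL (N : Int) : List Bool :=
  (PySem.List.pyRange 2 (pvSqrt N + 1) 1).foldl (pvSieveStepL N) (pvInit N)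

theorem pvMarkFoldA (L : List Int) (hL : ∀ p ∈ L, 0 ≤ p) (a : Array Bool) :
    (L.foldl (fun ns p => ns.setIfInBounds p.toNat false) a).toList =
    L.foldl (fun ns p => PySem.List.pySetD ns p false) a.toList := by
  induction L generalizing a with
  | nil => simp
  | cons p L ih =>
    rw [List.foldl_cons, List.foldl_cons,
      PySem.List.pySetD_of_nonneg a.toList false (hL p (by simp)),
      ← Array.toList_setIfInBounds]
    exact ih (fun x hx => hL x (by simp [hx])) _

theorem pvStep_toList (N i : Int) (hi : 2 ≤ i) (a : Array Bool) :
    (pvSieveStep N a i).toList = pvSieveStepL N a.toList i := by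
  unfold pvSieveStep pvSieveStepL
  have hcond : a.getD i.toNat false = PySem.List.pyGetD a.toList i false := by
    by_cases hlt : i.toNat < a.size
    · rw [PySem.List.pyGetD_eq_getElem a.toList false (by omega) (by simp; omega),
        Array.getD_eq_getD_getElem?, Array.getElem?_eq_getElem hlt, Option.getD_some,
        ← Array.getElem_toList]
    · rw [Array.getD_eq_getD_getElem?, Array.getElem?_eq_none (by omega), Option.getD_none,
        PySem.List.pyGetD_of_none a.toList i false ((PySem.List.pyGet?_eq_none_iff a.toList i).mpr (by
          unfold PySem.Raise.InRange
          simp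
          omega))]
  rw [hcond]
  split
  · exact pvMarkFoldA _ (fun p hp => by
      have := (PySem.List.mem_pyRange_iff_of_pos (by omega) p).mp hp
      nlinarith [this.1]) a
  · rfl

theorem pvFold_toList (N : Int) (L : List Int) (hmem : ∀ i ∈ L, 2 ≤ i) (a : Array Bool) :
    (L.foldl (pvSieveStep N) a).toList = L.foldl (pvSieveStepL N) a.toList := by
  induction L generalizing a with
  | nil => rfl
  | cons i L ih =>
    rw [List.foldl_cons, List.foldl_cons, ← pvStep_toList N i (hmem i (by simp)) a]
    exact ih (fun x hx => hmem x (List.mem_cons_of_mem _ hx)) _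

theorem pvSieve_toList (N : Int) : (pvSieve N).toList = pvSieveL N := by
  simp only [pvSieve, pvSieveL]
  rw [pvFold_toList N _ (fun i hi => (PySem.List.mem_pyRange_one.mp hi).1),
    Array.toList_setIfInBounds, Array.toList_setIfInBounds, List.toList_toArray]
  rfl

theorem pvGood_one (j : Int) : pvGood 1 j ↔ 2 ≤ j := by
  unfold pvGood
  exact ⟨fun h => h.1, fun h => ⟨h, fun d h1 h2 _ _ => by omega⟩⟩

theorem pvInit_spec (N : Int) (hN : 1 ≤ N) :
    (pvInit N).length = (N + 1).toNat ∧
    ∀ j : Nat, (pvInit N)[j]? =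
      if j < (N + 1).toNat then some (pvGoodB 1 (j : Int)) else none := by
  unfold pvInit
  rw [List.map_const']
  have hlen : ((PySem.List.pyRange 0 (N + 1) 1).length) = (N + 1).toNat := by
    rw [PySem.List.length_pyRange_one]
    omega
  rw [hlen]
  refine ⟨by simp, fun j => ?_⟩
  rcases j with _ | _ | j
  · rw [List.getElem?_set_ne (by omega), List.getElem?_set_self (by simp; omega),
      if_pos (by omega), pvGoodB_eq_false (by rw [pvGood_one]; omega)]
  · rw [List.getElem?_set_self (by simp; omega), if_pos (by omega),
      pvGoodB_eq_false (by rw [pvGood_one]; omega)]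
  · rw [List.getElem?_set_ne (by omega), List.getElem?_set_ne (by omega),
      List.getElem?_replicate]
    by_cases h : j + 1 + 1 < (N + 1).toNat
    · rw [if_pos h, if_pos h]
      have hg : pvGood 1 (((j + 1 + 1 : Nat) : Int)) := (pvGood_one _).mpr (by omega)
      push_cast at hg ⊢
      rw [pvGoodB_eq_true hg]
    · rw [if_neg h, if_neg h]

-- one pass of the outer loop preserves the characterisation, extending k by one
theorem pvSieveStepL_spec (N k : Int) (hN : 1 ≤ N) (hk : 1 ≤ k) (hkN : k + 1 ≤ N)
    (prev : List Bool) (hlen : prev.length = (N + 1).toNat)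
    (hget : ∀ j : Nat, j < (N + 1).toNat → prev[j]? = some (pvGoodB k (j : Int))) :
    (pvSieveStepL N prev (k + 1)).length = (N + 1).toNat ∧
    ∀ j : Nat, j < (N + 1).toNat →
      (pvSieveStepL N prev (k + 1))[j]? = some (pvGoodB (k + 1) (j : Int)) := by
  unfold pvSieveStepL
  have hi0 : (0 : Int) ≤ k + 1 := by omega
  have hitn : ((k + 1).toNat : Int) = k + 1 := by omega
  have hilt : (k + 1).toNat < (N + 1).toNat := by omega
  have hcond : PySem.List.pyGetD prev (k + 1) false = pvGoodB k (k + 1) := by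
    rw [PySem.List.pyGetD_eq_getElem prev false hi0 (by omega)]
    have := hget (k + 1).toNat hilt
    rw [List.getElem?_eq_getElem (by omega)] at this
    rw [Option.some.injEq] at this
    rw [this, hitn]
  rw [hcond]
  by_cases hgood : pvGood k (k + 1)
  · rw [if_pos (by rw [pvGoodB_eq_true hgood])]
    have hL : ∀ p ∈ PySem.List.pyRange ((k + 1) * (k + 1)) (N + 1) (k + 1), 0 ≤ p := by
      intro p hp
      have := (PySem.List.mem_pyRange_iff_of_pos (by omega) p).mp hp
      nlinarith [this.1]
    obtain ⟨hml, hmg⟩ := pvMarkFold _ hL prev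
    refine ⟨by rw [hml, hlen], fun j hj => ?_⟩
    rw [hmg j, hlen, if_pos hj, hget j hj]
    have hmem : ((j : Int) ∈ PySem.List.pyRange ((k + 1) * (k + 1)) (N + 1) (k + 1)) ↔
        ((k + 1) * (k + 1) ≤ (j : Int) ∧ (k + 1) ∣ (j : Int)) := by
      rw [PySem.List.mem_pyRange_iff_of_pos (by omega)]
      constructor
      · rintro ⟨h1, _, h3⟩
        exact ⟨h1, (dvd_sub_left ⟨k + 1, rfl⟩).mp h3⟩
      · rintro ⟨h1, h2⟩
        exact ⟨h1, by omega, (dvd_sub_left ⟨k + 1, rfl⟩).mpr h2⟩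
    by_cases hm : (j : Int) ∈ PySem.List.pyRange ((k + 1) * (k + 1)) (N + 1) (k + 1)
    · rw [if_pos hm]
      obtain ⟨hsq, hdvd⟩ := hmem.mp hm
      have : ¬ pvGood (k + 1) (j : Int) := by
        rintro ⟨_, hall⟩
        exact hall (k + 1) (by omega) le_rfl hsq hdvd
      rw [pvGoodB_eq_false this]
    · rw [if_neg hm]
      have heq : pvGood (k + 1) (j : Int) ↔ pvGood k (j : Int) := by
        unfold pvGood
        constructor
        · rintro ⟨h1, hall⟩
          exact ⟨h1, fun d hd1 hd2 => hall d hd1 (by omega) ⟩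
        · rintro ⟨h1, hall⟩
          refine ⟨h1, fun d hd1 hd2 hdd hdvd => ?_⟩
          rcases (by omega : d ≤ k ∨ d = k + 1) with hc | rfl
          · exact hall d hd1 hc hdd hdvd
          · exact (hmem.not.mp hm) ⟨hdd, hdvd⟩
      rw [pvGoodB_congr heq.symm]
  · rw [if_neg (by rw [pvGoodB_eq_false hgood]; exact Bool.false_ne_true)]
    refine ⟨hlen, fun j hj => ?_⟩
    rw [hget j hj]
    -- k+1 is composite: it has a small divisor already ≤ k, so processing it changes nothing
    have hcomp : ∃ d : Int, 2 ≤ d ∧ d ≤ k ∧ d * d ≤ k + 1 ∧ d ∣ (k + 1) := by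
      unfold pvGood at hgood
      by_contra hno
      push Not at hno
      exact hgood ⟨by omega, fun d h1 h2 h3 h4 => hno d h1 h2 h3 h4⟩
    have heq : pvGood (k + 1) (j : Int) ↔ pvGood k (j : Int) := by
      unfold pvGood
      constructor
      · rintro ⟨h1, hall⟩
        exact ⟨h1, fun d hd1 hd2 => hall d hd1 (by omega)⟩
      · rintro ⟨h1, hall⟩
        refine ⟨h1, fun d hd1 hd2 hdd hdvd => ?_⟩
        rcases (by omega : d ≤ k ∨ d = k + 1) with hc | rfl
        · exact hall d hd1 hc hdd hdvd
        · obtain ⟨e, he1, he2, he3, he4⟩ := hcomp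
          have hej : e ∣ (j : Int) := he4.trans hdvd
          exact hall e he1 he2 (by nlinarith) hej
    rw [pvGoodB_congr heq.symm]

-- state of the sieve after the outer loop has run over range(2, k+1), k = 1 + m
theorem pvSieve_inv (N : Int) (hN : 1 ≤ N) (m : Nat) (hkN : 1 + (m : Int) ≤ N) :
    ((PySem.List.pyRange 2 (1 + (m : Int) + 1) 1).foldl (pvSieveStepL N) (pvInit N)).length
      = (N + 1).toNat ∧
    ∀ j : Nat, j < (N + 1).toNat →
      ((PySem.List.pyRange 2 (1 + (m : Int) + 1) 1).foldl (pvSieveStepL N) (pvInit N))[j]?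
        = some (pvGoodB (1 + (m : Int)) (j : Int)) := by
  induction m with
  | zero =>
    rw [show ((1 : Int) + ((0 : Nat) : Int) + 1) = 2 by norm_num,
      PySem.List.pyRange_one_eq_nil le_rfl, List.foldl_nil]
    obtain ⟨h1, h2⟩ := pvInit_spec N hN
    refine ⟨h1, fun j hj => ?_⟩
    rw [h2 j, if_pos hj, show ((1 : Int) + ((0 : Nat) : Int)) = 1 by norm_num]
  | succ m ih =>
    have hm : 1 + (m : Int) ≤ N := by push_cast at hkN ⊢; omega
    obtain ⟨ihl, ihg⟩ := ih hm
    have hsplit : PySem.List.pyRange 2 (1 + ((m + 1 : Nat) : Int) + 1) 1 =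
        PySem.List.pyRange 2 (1 + (m : Int) + 1) 1 ++ [1 + (m : Int) + 1] := by
      have : (1 + ((m + 1 : Nat) : Int) + 1) = (1 + (m : Int) + 1) + 1 := by push_cast; ring
      rw [this, PySem.List.pyRange_one_succ_right (by omega)]
    rw [hsplit, List.foldl_append, List.foldl_cons, List.foldl_nil]
    obtain ⟨hl, hg⟩ := pvSieveStepL_spec N (1 + (m : Int)) hN (by omega)
      (by push_cast at hkN ⊢; omega) _ ihl ihg
    refine ⟨hl, fun j hj => ?_⟩
    rw [hg j hj, show (1 + ((m : Int)) + 1) = (1 + ((m + 1 : Nat) : Int)) by push_cast; ring]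

theorem pvSieveL_spec (N : Int) (hN : 1 ≤ N) :
    (pvSieveL N).length = (N + 1).toNat ∧
    ∀ j : Nat, j < (N + 1).toNat → (pvSieveL N)[j]? = some (pvPrimeB (j : Int)) := by
  have hs1 : 1 ≤ pvSqrt N := by
    rw [pvSqrt_eq]
    have : 1 ≤ Nat.sqrt N.toNat := Nat.le_sqrt'.mpr (by omega)
    omega
  have hsN : pvSqrt N ≤ N := by
    have := (le_pvSqrt_iff N (pvSqrt N) (by omega) (by omega)).mp le_rfl
    nlinarith
  obtain ⟨m, hm⟩ : ∃ m : Nat, pvSqrt N = 1 + (m : Int) := ⟨(pvSqrt N - 1).toNat, by omega⟩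
  obtain ⟨hl, hg⟩ := pvSieve_inv N hN m (by omega)
  unfold pvSieveL
  rw [hm]
  refine ⟨hl, fun j hj => ?_⟩
  rw [hg j hj]
  have : pvGood (1 + (m : Int)) (j : Int) ↔ pvPrimeI (j : Int) := by
    unfold pvGood pvPrimeI
    constructor
    · rintro ⟨h1, hall⟩
      refine ⟨h1, fun d hd hdd hdvd => ?_⟩
      have hdN : d * d ≤ N := by omega
      have : d ≤ pvSqrt N := (le_pvSqrt_iff N d (by omega) (by omega)).mpr hdN
      exact hall d hd (by omega) hdd hdvd
    · rintro ⟨h1, hall⟩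
      exact ⟨h1, fun d hd _ hdd hdvd => hall d hd hdd hdvd⟩
  rw [Option.some.injEq]
  by_cases hg : pvPrimeI (j : Int)
  · rw [pvPrimeB_eq_true hg, pvGoodB_eq_true (this.mpr hg)]
  · rw [pvPrimeB_eq_false hg, pvGoodB_eq_false (this.not.mpr hg)]

-- B's loop is "sum of the kept elements, and the first kept element"
theorem pvFoldB (L : List Int) (t : Int) (sm : Option Int) :
    L.foldl pvStep (t, sm) = (t + (L.filter pvIsPrime).sum, sm.or (L.filter pvIsPrime).head?) := by
  induction L generalizing t sm with
  | nil => simp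
  | cons x L ih =>
    rw [List.foldl_cons]
    by_cases hx : pvIsPrime x
    · have hstep : pvStep (t, sm) x = (t + x, if sm = none then some x else sm) := by
        simp [pvStep, hx]
      rw [hstep, ih]
      rcases sm with _ | s
      · simp only [List.filter_cons, hx, if_pos, List.sum_cons, List.head?_cons, Option.or,
          Prod.mk.injEq]
        exact ⟨by omega, by simp⟩
      · simp only [List.filter_cons, hx, if_pos, List.sum_cons, Option.or,
          Prod.mk.injEq]
        exact ⟨by omega, rfl⟩
    · have hstep : pvStep (t, sm) x = (t, sm) := by
        simp [pvStep, hx]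
      rw [hstep, ih]
      simp [hx]

-- min of a strictly increasing list is its head
theorem pvMinHead (l : List Int) (h : l.Pairwise (· < ·)) :
    PySem.List.min? l (fun x => x) = l.head? := by
  rcases l with _ | ⟨x, t⟩
  · rfl
  · rw [PySem.List.min?_id_cons, List.head?_cons]
    rcases PySem.List.foldl_min_mem t x with he | hm
    · rw [he]
    · have hlt : x < t.foldl min x := (List.pairwise_cons.mp h).1 _ hm
      have hle := (PySem.List.foldl_min_le t x).1
      omega

theorem pvSieve_size (N : Int) (hN : 1 ≤ N) : (pvSieve N).size = (N + 1).toNat := by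
  rw [← Array.length_toList, pvSieve_toList]
  exact (pvSieveL_spec N hN).1

-- the array read is the Python list read on the list shadow (wraparound included)
theorem pvRead_eq (a : Array Bool) (p : Int) (h1 : -(a.size : Int) ≤ p) (h2 : p < (a.size : Int)) :
    pvRead a p = PySem.List.pyGetD a.toList p false := by
  unfold pvRead
  by_cases hp : p < 0
  · rw [if_pos hp]
    have hk1 : 0 < (-p).toNat := by omega
    have hk2 : (-p).toNat ≤ a.toList.length := by simp; omega
    rw [show p = -((((-p).toNat : Nat)) : Int) by omega,
      PySem.List.pyGetD_neg_natCast a.toList (-p).toNat false hk1 hk2]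
    have hlt : (-((((-p).toNat : Nat)) : Int) + (a.size : Int)).toNat < a.size := by omega
    rw [Array.getD_eq_getD_getElem?, Array.getElem?_eq_getElem hlt, Option.getD_some,
      ← Array.getElem_toList]
    congr 1
    simp
    omega
  · rw [if_neg hp]
    have hlt : p.toNat < a.size := by omega
    rw [PySem.List.pyGetD_eq_getElem a.toList false (by omega) (by simp; omega),
      Array.getD_eq_getD_getElem?, Array.getElem?_eq_getElem hlt, Option.getD_some,
      ← Array.getElem_toList]

-- reading the sieve at a nonnegative index is the trial-division test
theorem pvRead_nonneg (N p : Int) (hN : 1 ≤ N) (hp : 0 ≤ p) (hpN : p ≤ N) :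
    pvRead (pvSieve N) p = pvPrimeB p := by
  have hsz := pvSieve_size N hN
  rw [pvRead_eq _ _ (by omega) (by omega), pvSieve_toList]
  obtain ⟨hl, hg⟩ := pvSieveL_spec N hN
  rw [PySem.List.pyGetD_eq_getElem (pvSieveL N) false hp (by rw [hl]; omega)]
  have h := hg p.toNat (by omega)
  rw [List.getElem?_eq_getElem (by omega), Option.some.injEq] at h
  rw [h, show ((p.toNat : Int)) = p by omega]

-- reading the sieve at a negative index wraps: numbers[p] is numbers[N+1+p]
theorem pvRead_neg (N p : Int) (hN : 1 ≤ N) (hp : p < 0) (hM : -(N + 1) ≤ p) :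
    pvRead (pvSieve N) p = pvPrimeB (N + 1 + p) := by
  have hsz := pvSieve_size N hN
  rw [pvRead_eq _ _ (by omega) (by omega), pvSieve_toList]
  obtain ⟨hl, hg⟩ := pvSieveL_spec N hN
  have hk1 : 0 < (-p).toNat := by omega
  have hk2 : (-p).toNat ≤ (pvSieveL N).length := by rw [hl]; omega
  rw [show p = -((((-p).toNat : Nat)) : Int) by omega,
    PySem.List.pyGetD_neg_natCast (pvSieveL N) (-p).toNat false hk1 hk2]
  have h := hg ((pvSieveL N).length - (-p).toNat) (by omega)
  rw [List.getElem?_eq_getElem (by omega), Option.some.injEq] at h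
  rw [h, show ((((pvSieveL N).length - (-p).toNat : Nat)) : Int) = N + 1 + -((((-p).toNat : Nat)) : Int) by omega]

-- on Pre_ ∧ ¬D_ the two programs test the same predicate on [M, N]
theorem pvFilter_eq (M N : Int) (h1 : 1 ≤ N) (h2 : -(N + 1) ≤ M) (hnD : ¬ D_get_prime_info M N) :
    ((PySem.List.pyRange M (N + 1) 1).filter (fun p => pvRead (pvSieve N) p)) =
    ((PySem.List.pyRange M (N + 1) 1).filter pvIsPrime) := by
  apply List.filter_congr
  intro p hp
  rw [PySem.List.mem_pyRange_one] at hp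
  by_cases h0 : 0 ≤ p
  · rw [pvRead_nonneg N p h1 h0 (by omega), pvIsPrime_eq]
  · rw [pvRead_neg N p h1 (by omega) (by omega)]
    have hq : ¬ pvPrimeI (N + 1 + p) := by
      intro hpr
      rw [pvPrimeI_iff] at hpr
      apply hnD
      unfold D_get_prime_info
      refine ⟨h1, by omega, (N + 1 + p).toNat, Finset.mem_Icc.mpr ?_, hpr.2⟩
      have hmax : max 2 (M + N + 1) ≤ N + 1 + p := max_le hpr.1 (by omega)
      have hm2 : (2 : Int) ≤ max 2 (M + N + 1) := le_max_left _ _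
      omega
    have hB : pvIsPrime p = false := by
      rcases hb : pvIsPrime p with _ | _
      · rfl
      · have := ((pvIsPrime_iff p).mp hb).1
        omega
    rw [hB, pvPrimeB_eq_false hq]

-- ===== VERDICT (by name: the statements are the Claim_ definitions above) =====
theorem get_prime_info_spec : Claim_unchanged_get_prime_info := by
  intro M N hDom hPre
  unfold Spec_get_prime_info
  intro hnD
  unfold Pre_get_prime_info at hPre
  obtain ⟨h1, h2⟩ := hPre
  simp only [get_prime_info, get_prime_info_alt]
  rw [pvFilter_eq M N h1 h2 hnD, pvFoldB]
  have hpw : ((PySem.List.pyRange M (N + 1) 1).filter pvIsPrime).Pairwise (· < ·) :=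
    List.Pairwise.filter _ (PySem.List.pairwise_lt_pyRange_one _ _)
  cases hPc : (PySem.List.pyRange M (N + 1) 1).filter pvIsPrime with
  | nil =>
    simp
  | cons x t =>
    have hmin := pvMinHead (x :: t) (hPc ▸ hpw)
    rw [List.head?_cons] at hmin
    simp [hmin]
theorem get_prime_info_changed : Claim_changed_get_prime_info := by
  unfold Claim_changed_get_prime_info; decide
theorem get_prime_info_tight : Claim_exact_get_prime_info := by
  intro M N hDom hPre hD
  unfold Pre_get_prime_info at hPre
  obtain ⟨h1, h2⟩ := hPre
  unfold D_get_prime_info at hD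
  obtain ⟨_, hM0, q, hq, hqp⟩ := hD
  rw [Finset.mem_Icc] at hq
  have hm2 : (2 : Int) ≤ max 2 (M + N + 1) := le_max_left _ _
  have hmM : M + N + 1 ≤ max 2 (M + N + 1) := le_max_right _ _
  have hq2 : 2 ≤ (q : Int) := by omega
  have hqN : (q : Int) ≤ N := by omega
  have hqM : M + N + 1 ≤ (q : Int) := by omega
  have hmem : ((q : Int) - (N + 1)) ∈ (PySem.List.pyRange M (N + 1) 1).filter
      (fun p => pvRead (pvSieve N) p) := by
    rw [List.mem_filter]
    refine ⟨PySem.List.mem_pyRange_one.mpr ⟨by omega, by omega⟩, ?_⟩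
    rw [pvRead_neg N _ h1 (by omega) (by omega)]
    have hpr : pvPrimeI ((q : Int)) := by
      rw [pvPrimeI_iff]
      exact ⟨hq2, by rw [show ((q : Int)).toNat = q by omega]; exact hqp⟩
    rw [show N + 1 + ((q : Int) - (N + 1)) = (q : Int) by ring]
    exact pvPrimeB_eq_true hpr
  simp only [get_prime_info, get_prime_info_alt]
  rw [pvFoldB]
  have hne : ((PySem.List.pyRange M (N + 1) 1).filter
      (fun p => pvRead (pvSieve N) p)).isEmpty = false := by
    rw [List.isEmpty_eq_false_iff_exists_mem]
    exact ⟨_, hmem⟩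
  rw [hne]
  obtain ⟨m, hm⟩ : ∃ m, PySem.List.min? ((PySem.List.pyRange M (N + 1) 1).filter
      (fun p => pvRead (pvSieve N) p)) (fun x => x) = some m := by
    cases hmm : PySem.List.min? ((PySem.List.pyRange M (N + 1) 1).filter
        (fun p => pvRead (pvSieve N) p)) (fun x => x) with
    | none =>
      rw [PySem.List.min?_eq_none_iff] at hmm
      rw [hmm] at hmem
      cases hmem
    | some m => exact ⟨m, rfl⟩
  have hm0 : m ≤ (q : Int) - (N + 1) := PySem.List.min?_isMin hm _ hmem
  rw [hm]
  cases hh : ((PySem.List.pyRange M (N + 1) 1).filter pvIsPrime).head? with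
  | none =>
    simp
  | some s =>
    have hs : 2 ≤ s := by
      have hsm : s ∈ (PySem.List.pyRange M (N + 1) 1).filter pvIsPrime :=
        List.mem_of_mem_head? hh
      rw [List.mem_filter] at hsm
      exact ((pvIsPrime_iff s).mp hsm.2).1
    simp only [Option.none_or, Option.getD_some, Bool.false_eq_true, if_false]
    intro heq
    rw [Option.some.injEq, Prod.mk.injEq] at heq
    omega
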